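-- pv_equiv track=rewrite | github.com/XieJesse/TheMistakes | app/game.py | blackjackWin
-- ===== SOURCE A (Python) =====
-- def blackjackWin(player_scores):
--     modified_player_scores = []
--     isPlayerWinner = False
--     isBlackJack = False
--     for i in range(len(player_scores)):
--         if player_scores[i] < 22:
--             modified_player_scores.append((i, player_scores[i]))
--     if (len(modified_player_scores) > 0):
--         values = [x[1] for x in modified_player_scores]
--         winner = values.index(max(values))
--         if (len(modified_player_scores) > 0 and modified_player_scores[winner][0] == 0):
--             isPlayerWinner = True
--         if(values[winner] == 21):
--             isBlackJack = True
--     return (isPlayerWinner, isBlackJack)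
-- ===== SOURCE B (Python) =====
-- def blackjackWin(player_scores):
--     best = None
--     for s in player_scores:
--         if s < 22 and (best is None or s > best):
--             best = s
--     isPlayerWinner = bool(player_scores) and player_scores[0] == best
--     isBlackJack = best == 21
--     return (isPlayerWinner, isBlackJack)
-- ===== Notes on version B (the rewrite author's own statement) =====
-- stated objective: simpler
-- what changed: Replaces A's (index,score) list building, values-list extraction and argmax-index search with a single running-max pass over the scores and two direct comparisons; no intermediate lists.
import Mathlib
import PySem

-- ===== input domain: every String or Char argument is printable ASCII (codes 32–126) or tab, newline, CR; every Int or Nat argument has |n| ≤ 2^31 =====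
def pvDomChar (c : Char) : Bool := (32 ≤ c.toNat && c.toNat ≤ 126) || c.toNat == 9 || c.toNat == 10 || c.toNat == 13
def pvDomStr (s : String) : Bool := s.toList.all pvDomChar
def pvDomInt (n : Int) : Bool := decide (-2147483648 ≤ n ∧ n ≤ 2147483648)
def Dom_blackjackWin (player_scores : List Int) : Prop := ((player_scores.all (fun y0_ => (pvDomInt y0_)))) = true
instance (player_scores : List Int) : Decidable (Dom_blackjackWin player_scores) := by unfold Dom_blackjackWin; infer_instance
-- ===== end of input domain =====

-- B replaces A's (index,score) list / values list / argmax-index machinery by a single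
-- running-max pass over the scores and two direct comparisons (objective: simpler).

-- ===== PORT A =====
def blackjackWin (player_scores : List Int) : Bool × Bool :=
  let modified := (PySem.List.pyRange 0 (player_scores.length : Int) 1).foldl
    (fun acc i =>
      if PySem.List.pyGetD player_scores i 0 < 22 then
        acc ++ [(i, PySem.List.pyGetD player_scores i 0)]
      else acc) ([] : List (Int × Int))
  if modified.length > 0 then
    let values := modified.map (fun x => x.2)
    let mx := (PySem.List.max? values (fun y => y)).getD 0       -- max(values); values is nonempty here
    let winner := (PySem.List.index? values mx).getD 0           -- values.index(mx); mx ∈ values here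
    let isPlayerWinner := decide (modified.length > 0) && ((PySem.List.pyGetD modified (winner : Int) (0, 0)).1 == 0)
    let isBlackJack := (PySem.List.pyGetD values (winner : Int) 0 == 21)
    (isPlayerWinner, isBlackJack)
  else (false, false)

-- ===== PORT B =====
def blackjackWin_alt (player_scores : List Int) : Bool × Bool :=
  let best := player_scores.foldl
    (fun (acc : Option Int) s =>
      if s < 22 && (match acc with | none => true | some b => decide (b < s)) then some s else acc)
    none
  let isPlayerWinner := !player_scores.isEmpty && (best == some (PySem.List.pyGetD player_scores 0 0))
  let isBlackJack := best == some 21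
  (isPlayerWinner, isBlackJack)

-- ===== PRECONDITION & SPEC =====
def Spec_blackjackWin (player_scores : List Int) (out : Bool × Bool) : Prop := out = blackjackWin_alt player_scores
instance (player_scores : List Int) (out : Bool × Bool) : Decidable (Spec_blackjackWin player_scores out) := by unfold Spec_blackjackWin; infer_instance

-- ===== CLAIM (what is proved, stated in full; the proofs are below) =====
def Claim_equal_blackjackWin : Prop := ∀ (player_scores : List Int), Dom_blackjackWin player_scores → Spec_blackjackWin player_scores (blackjackWin player_scores)

-- ===== LEMMAS AND PROOFS =====

theorem fold_max_some (t : List Int) (a : Int) :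
    t.foldl (fun (acc : Option Int) s =>
      if (match acc with | none => true | some b => decide (b < s)) then some s else acc) (some a)
    = some (t.foldl max a) := by
  induction t generalizing a with
  | nil => rfl
  | cons x xs ih =>
    simp only [List.foldl]
    rcases lt_or_ge a x with h | h
    · simp [h, ih, max_eq_right h.le]
    · have : ¬ (a < x) := not_lt.mpr h
      simp [this, ih, max_eq_left h]

theorem best_eq (ps : List Int) :
    ps.foldl (fun (acc : Option Int) s =>
      if s < 22 && (match acc with | none => true | some b => decide (b < s)) then some s else acc) none
    = match ps.filter (fun s => decide (s < 22)) with
      | [] => none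
      | h :: t => some (t.foldl max h) := by
  have hfun : ps.foldl (fun (acc : Option Int) s =>
        if s < 22 && (match acc with | none => true | some b => decide (b < s)) then some s else acc) none
      = (ps.filter (fun s => decide (s < 22))).foldl
        (fun (acc : Option Int) s =>
          if (match acc with | none => true | some b => decide (b < s)) then some s else acc) none := by
    rw [List.foldl_filter]
    congr 1
    funext acc s
    by_cases h : s < 22
    · simp [h]
    · simp [h]
  rw [hfun]
  cases hv : ps.filter (fun s => decide (s < 22)) with
  | nil => rfl
  | cons v vt => simp [List.foldl, fold_max_some]

theorem foldl_append_ite' {α β : Type} (p : α → Prop) [DecidablePred p] (f : α → β) (l : List α) (acc : List β) :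
    l.foldl (fun a x => if p x then a ++ [f x] else a) acc
      = acc ++ (l.filter (fun x => decide (p x))).map f := by
  induction l generalizing acc with
  | nil => simp
  | cons x xs ih =>
    by_cases h : p x
    · simp [List.foldl, h, ih]
    · simp [List.foldl, h, ih]

theorem values_eq (ps : List Int) :
    ((PySem.List.pyRange 0 (ps.length : Int) 1).filter
        (fun i => decide (PySem.List.pyGetD ps i 0 < 22))).map (fun i => PySem.List.pyGetD ps i 0)
      = ps.filter (fun s => decide (s < 22)) := by
  have h := PySem.List.map_pyGetD_pyRange_zero' ps (0 : Int)
  calc ((PySem.List.pyRange 0 (ps.length : Int) 1).filter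
        (fun i => decide (PySem.List.pyGetD ps i 0 < 22))).map (fun i => PySem.List.pyGetD ps i 0)
      = ((PySem.List.pyRange 0 (ps.length : Int) 1).map (fun i => PySem.List.pyGetD ps i 0)).filter
          (fun s => decide (s < 22)) := by rw [List.filter_map]; rfl
    _ = ps.filter (fun s => decide (s < 22)) := by rw [h]

theorem main_eq (ps : List Int) : blackjackWin ps = blackjackWin_alt ps := by
  simp only [blackjackWin, blackjackWin_alt]
  rw [foldl_append_ite' (fun i => PySem.List.pyGetD ps i 0 < 22)
      (fun i => (i, PySem.List.pyGetD ps i 0))]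
  rw [best_eq ps]
  simp only [List.nil_append, List.map_map, Function.comp_def]
  rw [values_eq ps]
  cases hvs : ps.filter (fun s => decide (s < 22)) with
  | nil =>
      have hidxs : (PySem.List.pyRange 0 (ps.length : Int) 1).filter
          (fun x => decide (PySem.List.pyGetD ps x 0 < 22)) = [] := by
        have h := values_eq ps
        rw [hvs] at h
        exact List.map_eq_nil_iff.mp h
      simp [hidxs]
  | cons v vt =>
      have hmap : ((PySem.List.pyRange 0 (ps.length : Int) 1).filter
          (fun x => decide (PySem.List.pyGetD ps x 0 < 22))).map (fun i => PySem.List.pyGetD ps i 0)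
          = v :: vt := by rw [values_eq ps, hvs]
      set idxs := (PySem.List.pyRange 0 (ps.length : Int) 1).filter
          (fun x => decide (PySem.List.pyGetD ps x 0 < 22)) with hidxs_def
      have hlen : idxs.length = vt.length + 1 := by simpa using congrArg List.length hmap
      have hgt : (idxs.map (fun i => (i, PySem.List.pyGetD ps i 0))).length > 0 := by
        simp [hlen]
      rw [if_pos hgt]
      rw [PySem.List.max?_id_cons]
      simp only [Option.getD_some]
      have hmem : vt.foldl max v ∈ v :: vt := by
        rcases PySem.List.foldl_max_mem vt v with h | h
        · rw [h]; exact List.mem_cons_self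
        · exact List.mem_cons_of_mem _ h
      obtain ⟨k, hk⟩ : ∃ k, PySem.List.index? (v :: vt) (vt.foldl max v) = some k := by
        have h := (PySem.List.index?_isSome_iff (v :: vt) (vt.foldl max v)).mpr hmem
        exact Option.isSome_iff_exists.mp h
      rw [hk]
      simp only [Option.getD_some]
      obtain ⟨hklt, hgk, -⟩ := PySem.List.getElem_of_index?_eq_some hk
      have hk2 : k < idxs.length := by
        rw [hlen]; simpa using hklt
      have hbj : PySem.List.pyGetD (v :: vt) ((k : Int)) 0 = vt.foldl max v := by
        rw [PySem.List.pyGetD_natCast, List.getD_eq_getElem _ _ hklt, hgk]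
      have hwin : (PySem.List.pyGetD (idxs.map (fun i => (i, PySem.List.pyGetD ps i 0)))
          ((k : Int)) (0, 0)).1 = idxs[k] := by
        rw [PySem.List.pyGetD_natCast, List.getD_eq_getElem _ _ (by simpa using hk2),
          List.getElem_map]
      rw [hbj, hwin]
      simp only [List.length_map, hlen]
      norm_num
      clear_value idxs
      clear hgt hbj hwin hmap
      cases ps with
      | nil => simp at hvs
      | cons h t =>
        simp only [List.isEmpty_cons, Bool.not_false, Bool.true_and,
          PySem.List.pyGetD_zero_cons]
        simp only [List.length_cons, Nat.cast_add, Nat.cast_one] at hidxs_def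
        have hrange : PySem.List.pyRange 0 ((t.length : Int) + 1) 1
            = 0 :: PySem.List.pyRange 1 ((t.length : Int) + 1) 1 := by
          rw [PySem.List.pyRange_one_cons (by positivity)]
          norm_num
        by_cases hh : h < 22
        · -- head kept by the filter
          have hid : idxs = 0 :: (PySem.List.pyRange 1 ((t.length : Int) + 1) 1).filter
              (fun x => decide (PySem.List.pyGetD (h :: t) x 0 < 22)) := by
            rw [hidxs_def, hrange,
              List.filter_cons_of_pos (by simp [PySem.List.pyGetD_zero_cons, hh])]
          have hvs' := hvs
          rw [List.filter_cons_of_pos (by simp [hh])] at hvs'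
          injection hvs' with hveq hvteq
          by_cases hMh : List.foldl max v vt = h
          · have hk0 : k = 0 := by
              rw [hMh, hveq, PySem.List.index?_cons_self v vt] at hk
              exact (Option.some_inj.mp hk).symm
            subst hk0
            simp only [hid, List.getElem_cons_zero, hMh]
            norm_num
          · have hne : v ≠ List.foldl max v vt := by
              intro e; exact hMh (by rw [← e, ← hveq])
            rw [PySem.List.index?_cons_of_ne vt hne] at hk
            obtain ⟨j, hj, hjk⟩ := Option.map_eq_some_iff.mp hk
            subst hjk
            have hall : ∀ x ∈ (PySem.List.pyRange 1 ((t.length : Int) + 1) 1).filter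
                (fun x => decide (PySem.List.pyGetD (h :: t) x 0 < 22)), (1 : Int) ≤ x := by
              intro x hx
              exact (PySem.List.mem_pyRange_one.mp (List.mem_filter.mp hx).1).1
            have hjlt : j < ((PySem.List.pyRange 1 ((t.length : Int) + 1) 1).filter
                (fun x => decide (PySem.List.pyGetD (h :: t) x 0 < 22))).length := by
              have h3 := hk2
              rw [hid, List.length_cons] at h3
              omega
            have hne0 : ((PySem.List.pyRange 1 ((t.length : Int) + 1) 1).filter
                (fun x => decide (PySem.List.pyGetD (h :: t) x 0 < 22)))[j]'hjlt ≠ 0 := by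
              have := hall _ (List.getElem_mem hjlt)
              omega
            simp only [hid, List.getElem_cons_succ]
            simp [hne0, hMh]
        · -- head dropped by the filter
          have hid : idxs = (PySem.List.pyRange 1 ((t.length : Int) + 1) 1).filter
              (fun x => decide (PySem.List.pyGetD (h :: t) x 0 < 22)) := by
            rw [hidxs_def, hrange,
              List.filter_cons_of_neg (by simp [PySem.List.pyGetD_zero_cons, hh])]
          have hall : ∀ x ∈ idxs, (1 : Int) ≤ x := by
            rw [hid]
            intro x hx
            exact (PySem.List.mem_pyRange_one.mp (List.mem_filter.mp hx).1).1
          have hne0 : idxs[k]'hk2 ≠ 0 := by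
            have := hall _ (List.getElem_mem hk2)
            omega
          have hMlt : List.foldl max v vt < 22 := by
            have hmem' : List.foldl max v vt ∈ List.filter (fun s => decide (s < 22)) (h :: t) := by
              rw [hvs]; exact hmem
            simpa using List.of_mem_filter hmem'
          have hMne : List.foldl max v vt ≠ h := by omega
          simp [hne0, hMne]

-- ===== VERDICT (by name: the statement is the Claim_ definition above) =====
theorem blackjackWin_spec : Claim_equal_blackjackWin := by
  intro ps _
  exact main_eq ps
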